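-- pv_equiv track=rewrite | github.com/Hellol77/Algorithm | ascending.py | solve
-- ===== SOURCE A (Python) =====
-- def solve(A):
-- 	S =[[0 for col in range(len(A)+1)] for row in range(201)]
-- 	for x in range(1,len(A)+1):
-- 		for k in range(1,201):
-- 			T=S[1][x-1]
-- 			for t in range(1,k+1):
-- 				if T>S[t][x-1]:
-- 					T=S[t][x-1]
-- 			S[k][x]=T+abs(A[x-1]-k)
-- 	L=S[1][len(A)]
-- 	for p in range(1,201):
-- 		if L>S[p][len(A)]:
-- 			L=S[p][len(A)]
-- 	return L
-- ===== SOURCE B (Python) =====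
-- def solve(A):
--     prev = [0] * 201
--     for a in A:
--         best = prev[1]
--         cur = [0]
--         for k in range(1, 201):
--             if prev[k] < best:
--                 best = prev[k]
--             cur.append(best + abs(a - k))
--         prev = cur
--     return min(prev[1:])
-- ===== Notes on version B (the rewrite author's own statement) =====
-- stated objective: faster
-- what changed: B keeps only the previous DP column and maintains a running prefix-minimum over k instead of rescanning S[1..k] for every (x,k), removing the inner t-loop.
import Mathlib
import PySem

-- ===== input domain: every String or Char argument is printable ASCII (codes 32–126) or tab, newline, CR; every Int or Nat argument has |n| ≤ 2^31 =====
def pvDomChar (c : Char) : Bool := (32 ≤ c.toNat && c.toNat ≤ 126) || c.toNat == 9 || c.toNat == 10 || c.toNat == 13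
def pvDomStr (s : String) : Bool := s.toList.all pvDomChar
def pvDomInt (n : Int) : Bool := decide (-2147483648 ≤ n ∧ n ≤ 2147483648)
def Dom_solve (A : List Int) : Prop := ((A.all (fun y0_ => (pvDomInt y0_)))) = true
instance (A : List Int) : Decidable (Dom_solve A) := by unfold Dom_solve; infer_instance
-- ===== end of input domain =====

-- B replaces A's inner rescan 'min(S[1..k][x-1])' by a running prefix minimum: O(n·200) instead of O(n·200²); measurably faster.
-- Both ports keep only the previous DP column (A writes column x before reading column x+1, so the values are identical).

-- ===== PORT A =====
-- inner t-loop of A: T = S[1][x-1]; for t in range(1,k+1): if T > S[t][x-1]: T = S[t][x-1]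
def solveT (prev : List Int) (k : Int) : Int :=
  (PySem.List.pyRange 1 (k+1) 1).foldl
    (fun T t => if T > PySem.List.pyGetD prev t 0 then PySem.List.pyGetD prev t 0 else T)
    (PySem.List.pyGetD prev 1 0)

-- k-loop of A for one x: builds column x (index 0 is the unused row S[0])
def solveCol (prev : List Int) (a : Int) : List Int :=
  (PySem.List.pyRange 1 201 1).foldl
    (fun cur k => cur ++ [solveT prev k + |a - k|]) [0]

def solve (A : List Int) : Int :=
  let final := A.foldl (fun prev a => solveCol prev a) (List.replicate 201 (0:Int))
  (PySem.List.pyRange 1 201 1).foldl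
    (fun L p => if L > PySem.List.pyGetD final p 0 then PySem.List.pyGetD final p 0 else L)
    (PySem.List.pyGetD final 1 0)

-- ===== PORT B =====
-- one pass of B's k-loop: state (best, cur); best is the running prefix minimum of prev[1..k]
def solveColB (prev : List Int) (a : Int) : List Int :=
  ((PySem.List.pyRange 1 201 1).foldl
    (fun (st : Int × List Int) k =>
      let best := if PySem.List.pyGetD prev k 0 < st.1 then PySem.List.pyGetD prev k 0 else st.1
      (best, st.2 ++ [best + |a - k|]))
    (PySem.List.pyGetD prev 1 0, ([0] : List Int))).2

def solve_alt (A : List Int) : Int :=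
  let final := A.foldl (fun prev a => solveColB prev a) (List.replicate 201 (0:Int))
  -- min(prev[1:]); final always has length 201, so the slice is nonempty and the default is never used
  (PySem.List.min? (PySem.List.slice final (some 1) none) (fun x => x)).getD 0

-- ===== PRECONDITION & SPEC =====
def Spec_solve (A : List Int) (out : Int) : Prop := out = solve_alt A
instance (A : List Int) (out : Int) : Decidable (Spec_solve A out) := by unfold Spec_solve; infer_instance

-- ===== CLAIM (what is proved, stated in full; the proofs are below) =====
def Claim_equal_solve : Prop := ∀ (A : List Int), Dom_solve A → Spec_solve A (solve A)

-- ===== LEMMAS AND PROOFS =====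

theorem solveT_zero (prev : List Int) : solveT prev 0 = PySem.List.pyGetD prev 1 0 := by
  simp [solveT, PySem.List.pyRange_one_eq_nil]

theorem solveT_succ (prev : List Int) (k : Int) (hk : 0 ≤ k) :
    solveT prev (k+1) =
      if solveT prev k > PySem.List.pyGetD prev (k+1) 0
      then PySem.List.pyGetD prev (k+1) 0 else solveT prev k := by
  unfold solveT
  rw [PySem.List.pyRange_one_succ_right (by omega : (1:Int) ≤ k + 1), List.foldl_append]
  simp

-- B's running state after the first n iterations equals (solveT prev n, A's partial column)
theorem col_invariant (prev : List Int) (a : Int) (n : Nat) :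
    (PySem.List.pyRange 1 ((n:Int)+1) 1).foldl
      (fun (st : Int × List Int) k =>
        let best := if PySem.List.pyGetD prev k 0 < st.1 then PySem.List.pyGetD prev k 0 else st.1
        (best, st.2 ++ [best + |a - k|]))
      (PySem.List.pyGetD prev 1 0, ([0] : List Int))
    = (solveT prev n,
       (PySem.List.pyRange 1 ((n:Int)+1) 1).foldl
         (fun cur k => cur ++ [solveT prev k + |a - k|]) [0]) := by
  induction n with
  | zero => simp [PySem.List.pyRange_one_eq_nil, solveT_zero]
  | succ m ih =>
      have hr : PySem.List.pyRange 1 ((m:Int)+1+1) 1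
          = PySem.List.pyRange 1 ((m:Int)+1) 1 ++ [(m:Int)+1] := by
        exact PySem.List.pyRange_one_succ_right (by omega)
      have hT := solveT_succ prev m (by omega)
      push_cast
      rw [hr, List.foldl_append, List.foldl_append, ih]
      simp only [List.foldl_cons, List.foldl_nil, Prod.mk.injEq]
      rw [hT]
      simp only [gt_iff_lt]
      exact ⟨trivial, trivial⟩

theorem colB_eq_colA (prev : List Int) (a : Int) : solveColB prev a = solveCol prev a := by
  unfold solveColB solveCol
  rw [show (201:Int) = ((200:Nat):Int)+1 by norm_num, col_invariant]

theorem col_shape (prev : List Int) (a : Int) :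
    solveCol prev a = 0 :: (PySem.List.pyRange 1 201 1).map (fun k => solveT prev k + |a - k|) := by
  unfold solveCol
  rw [PySem.List.foldl_append_singleton_eq_map]
  rfl

-- the final column is 0 followed by 200 entries
theorem final_shape (A : List Int) :
    ∃ rest : List Int, A.foldl (fun prev a => solveCol prev a) (List.replicate 201 (0:Int))
        = 0 :: rest ∧ rest.length = 200 := by
  induction A using List.reverseRecOn with
  | nil =>
      refine ⟨List.replicate 200 0, ?_, by rw [List.length_replicate]⟩
      simp only [List.foldl_nil]
      rw [show (201:Nat) = 200+1 from rfl, List.replicate_succ]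
  | append_singleton xs x _ =>
      refine ⟨(PySem.List.pyRange 1 201 1).map
        (fun k => solveT (xs.foldl (fun prev a => solveCol prev a) (List.replicate 201 (0:Int))) k + |x - k|),
        ?_, ?_⟩
      · rw [List.foldl_append]; simp only [List.foldl_cons, List.foldl_nil]; exact col_shape _ _
      · rw [List.length_map, PySem.List.length_pyRange_one]; decide

-- fold of Python's running-min body = fold of min
theorem foldl_runmin_eq_min (l : List Int) (init : Int) :
    l.foldl (fun L v => if L > v then v else L) init = l.foldl min init := by
  induction l generalizing init with
  | nil => rfl
  | cons x t ih =>
      simp only [List.foldl_cons, ih]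
      congr 1
      split_ifs with h <;> omega

theorem min_over_cons (r0 : Int) (t : List Int) :
    (r0 :: t).foldl min r0 = t.foldl min r0 := by
  simp [List.foldl_cons]

-- ===== VERDICT (by name: the statement is the Claim_ definition above) =====
theorem solve_spec : Claim_equal_solve := by
  intro A _
  show solve A = solve_alt A
  unfold solve solve_alt
  simp only
  have hcol : (fun (prev : List Int) (a : Int) => solveColB prev a)
      = (fun prev a => solveCol prev a) := by
    funext prev a; exact colB_eq_colA prev a
  rw [hcol]
  obtain ⟨rest, hfin, hlen⟩ := final_shape A
  rw [hfin]
  obtain ⟨r0, t, rfl⟩ : ∃ r0 t, rest = r0 :: t := by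
    cases rest with
    | nil => simp at hlen
    | cons r0 t => exact ⟨r0, t, rfl⟩
  -- A's final scan over indices 1..200 = foldl min over the tail
  simp only [List.length_cons] at hlen
  have hlenfin : PySem.List.len (0 :: r0 :: t) = (201 : Int) := by
    simp only [PySem.List.len, List.length_cons]; omega
  have hA : (PySem.List.pyRange 1 201 1).foldl
      (fun L p => if L > PySem.List.pyGetD (0 :: r0 :: t) p 0
                  then PySem.List.pyGetD (0 :: r0 :: t) p 0 else L)
      (PySem.List.pyGetD (0 :: r0 :: t) 1 0)
      = (r0 :: t).foldl min r0 := by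
    rw [show (201 : Int) = PySem.List.len (0 :: r0 :: t) from hlenfin.symm]
    rw [PySem.List.foldl_pyRange_pyGetD (0 :: r0 :: t) 0
        (fun L v => if L > v then v else L) _ (a := 1) (by omega)]
    simp only [Int.toNat_one, List.drop_succ_cons, List.drop_zero]
    rw [foldl_runmin_eq_min]
    congr 1
    simp [PySem.List.pyGetD, PySem.List.pyIdx?, PySem.List.pyGet?]
  rw [hA, min_over_cons]
  -- B's side: min? of the tail slice
  rw [PySem.List.slice_from_one]
  simp only [List.tail_cons]
  rcases hmin : PySem.List.min? (r0 :: t) (fun x => x) with _ | m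
  · exact absurd ((PySem.List.min?_eq_none_iff _ _).mp hmin) (by simp)
  · have hm_mem : m ∈ r0 :: t := PySem.List.min?_mem hmin
    have hm_min : ∀ y ∈ r0 :: t, m ≤ y := fun y hy => PySem.List.min?_isMin hmin y hy
    have hr : List.min? (r0 :: t) = some (t.foldl min r0) := List.min?_cons'
    have hchar := (List.min?_eq_some_iff (xs := r0 :: t)).mp hr
    simp only [Option.getD_some]
    exact le_antisymm (hchar.2 m hm_mem) (hm_min _ hchar.1)
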